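-- pv_equiv track=rewrite | github.com/JieyuZhao/coref | minimize.py | get_sentence_map
-- ===== SOURCE A (Python) =====
-- def get_sentence_map(segments, sentence_end):
--   current = 0
--   sent_map = []
--   sent_end_idx = 0
--   assert len(sentence_end) == sum([len(s) -2 for s in segments])
--   for segment in segments:
--     sent_map.append(current)
--     for i in range(len(segment) - 2):
--       sent_map.append(current)
--       current += int(sentence_end[sent_end_idx])
--       sent_end_idx += 1
--     sent_map.append(current)
--   return sent_map
-- ===== SOURCE B (Python) =====
-- def get_sentence_map(segments, sentence_end):
--   assert len(sentence_end) == sum([len(s) - 2 for s in segments])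
--   # prefix[k] = number of sentence ends among the first k flags
--   prefix = [0]
--   for b in sentence_end:
--     prefix.append(prefix[-1] + int(b))
--   sent_map = []
--   start = 0
--   for segment in segments:
--     n = len(segment) - 2
--     sent_map.append(prefix[start])
--     sent_map.extend(prefix[start:start + n + 1])
--     start += n
--   return sent_map
-- ===== Notes on version B (the rewrite author's own statement) =====
-- stated objective: alternative
-- what changed: B precomputes a prefix-sum table of int(sentence_end) once and builds each segment's entries as one boundary value plus a slice of that table, replacing A's running-counter inner loop.
import Mathlib
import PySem

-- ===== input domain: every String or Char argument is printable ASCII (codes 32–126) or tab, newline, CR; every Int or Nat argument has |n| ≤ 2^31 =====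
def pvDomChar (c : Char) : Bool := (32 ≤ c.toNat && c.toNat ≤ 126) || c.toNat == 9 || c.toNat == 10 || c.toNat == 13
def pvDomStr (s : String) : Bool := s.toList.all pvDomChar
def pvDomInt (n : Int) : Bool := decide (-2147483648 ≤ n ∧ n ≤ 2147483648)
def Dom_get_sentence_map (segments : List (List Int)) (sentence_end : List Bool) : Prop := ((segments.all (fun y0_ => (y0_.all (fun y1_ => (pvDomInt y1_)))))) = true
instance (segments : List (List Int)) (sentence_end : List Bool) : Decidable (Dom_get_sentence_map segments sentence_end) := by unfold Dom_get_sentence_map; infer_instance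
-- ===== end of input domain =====

-- B replaces A's inner accumulation loop by a precomputed prefix-sum table plus slicing (alternative decomposition, same cost).
-- Pre_ excludes exactly the inputs on which the Python A raises (failed assert, or an IndexError into sentence_end).


-- ===== PORT A =====
-- inner loop body: sent_map.append(current); current += int(sentence_end[sent_end_idx]); sent_end_idx += 1
-- (the 'none' branch is Python's IndexError, excluded by Pre_)
def innerStepA (sentence_end : List Bool) (st : Int × List Int × Nat) (_ : Int) : Int × List Int × Nat :=
  (st.1 + (match PySem.List.pyGet? sentence_end ((st.2.2 : Int)) with
           | some b => if b then (1 : Int) else 0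
           | none => 0),
   st.2.1 ++ [st.1], st.2.2 + 1)

-- outer loop body over one segment
def stepA (sentence_end : List Bool) (st : Int × List Int × Nat) (segment : List Int) : Int × List Int × Nat :=
  let st1 : Int × List Int × Nat := (st.1, st.2.1 ++ [st.1], st.2.2)
  let st2 := (PySem.List.pyRange 0 ((segment.length : Int) - 2) 1).foldl (innerStepA sentence_end) st1
  (st2.1, st2.2.1 ++ [st2.1], st2.2.2)

def get_sentence_map (segments : List (List Int)) (sentence_end : List Bool) : List Int :=
  -- the Python assert is the Pre_ condition
  (segments.foldl (stepA sentence_end) (0, [], 0)).2.1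

-- ===== PORT B =====
-- prefix.append(prefix[-1] + int(b))
def preStepB (p : List Int) (b : Bool) : List Int :=
  p ++ [(PySem.List.pyGet? p (-1)).getD 0 + (if b then (1 : Int) else 0)]

-- per-segment: sent_map.append(prefix[start]); sent_map.extend(prefix[start:start+n+1]); start += n
def stepB (pre : List Int) (st : List Int × Int) (segment : List Int) : List Int × Int :=
  let n : Int := (segment.length : Int) - 2
  (st.1 ++ [(PySem.List.pyGet? pre st.2).getD 0]
        ++ PySem.List.slice pre (some st.2) (some (st.2 + n + 1)),
   st.2 + n)

def get_sentence_map_alt (segments : List (List Int)) (sentence_end : List Bool) : List Int :=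
  let pre := sentence_end.foldl preStepB [0]
  (segments.foldl (stepB pre) ([], 0)).1

-- ===== PRECONDITION & SPEC =====
-- Pre_ = exactly the inputs where Python A returns: the assert holds, and no segment is shorter
-- than 2 (with the assert holding, a shorter segment always drives sentence_end's index out of range → IndexError).
def Pre_get_sentence_map (segments : List (List Int)) (sentence_end : List Bool) : Prop :=
  (∀ s ∈ segments, 2 ≤ s.length) ∧
  (segments.map (fun s => (s.length : Int) - 2)).sum = (sentence_end.length : Int)
instance (segments : List (List Int)) (sentence_end : List Bool) : Decidable (Pre_get_sentence_map segments sentence_end) := by unfold Pre_get_sentence_map; infer_instance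

def pvWitness_get_sentence_map : List (List Int) × List Bool := ([[1, 2, 3], [4, 5]], [true])

def Spec_get_sentence_map (segments : List (List Int)) (sentence_end : List Bool) (out : List Int) : Prop := out = get_sentence_map_alt segments sentence_end
instance (segments : List (List Int)) (sentence_end : List Bool) (out : List Int) : Decidable (Spec_get_sentence_map segments sentence_end out) := by unfold Spec_get_sentence_map; infer_instance

-- ===== CLAIM (what is proved, stated in full; the proofs are below) =====
def Claim_equal_get_sentence_map : Prop := ∀ (segments : List (List Int)) (sentence_end : List Bool), Dom_get_sentence_map segments sentence_end → Pre_get_sentence_map segments sentence_end → Spec_get_sentence_map segments sentence_end (get_sentence_map segments sentence_end)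

-- ===== LEMMAS AND PROOFS =====

-- int(b)
def ib (b : Bool) : Int := if b then 1 else 0

-- S se k = sum of int(flag) over the first k flags
def S (se : List Bool) (k : Nat) : Int := ((se.take k).map ib).sum

theorem S_zero (se : List Bool) : S se 0 = 0 := by simp [S]

theorem S_cons_succ (b : Bool) (r : List Bool) (k : Nat) :
    S (b :: r) (k + 1) = ib b + S r k := by
  simp [S]

theorem S_succ (se : List Bool) (i : Nat) :
    S se (i + 1) = S se i +
      (match PySem.List.pyGet? se ((i : Int)) with
       | some b => if b then (1 : Int) else 0
       | none => 0) := by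
  rw [PySem.List.pyGet?_natCast]
  cases h : se[i]? with
  | none =>
    have hlen : se.length ≤ i := List.getElem?_eq_none_iff.mp h
    simp [S, List.take_of_length_le (by omega : se.length ≤ i),
          List.take_of_length_le (by omega : se.length ≤ i + 1)]
  | some b =>
    simp [S, List.take_succ, h, ib]

-- inner loop of A: appends S se i, …, S se (i+n-1) and ends with current = S se (i+n)
theorem innerA_eq (se : List Bool) (l : List Int) : ∀ (i : Nat) (m : List Int),
    l.foldl (innerStepA se) (S se i, m, i)
      = (S se (i + l.length),
         m ++ (List.range l.length).map (fun j => S se (i + j)),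
         i + l.length) := by
  induction l with
  | nil => intro i m; simp
  | cons x t ih =>
    intro i m
    have hstep : innerStepA se (S se i, m, i) x = (S se (i + 1), m ++ [S se i], i + 1) := by
      simp [innerStepA, S_succ]
    rw [List.foldl_cons, hstep, ih (i + 1) (m ++ [S se i])]
    refine Prod.ext ?_ (Prod.ext ?_ ?_)
    · simp; ring_nf
    · simp [List.range_succ_eq_map, List.map_map, Function.comp]
      intro a _
      congr 1
      omega
    · simp; omega

-- prefix table characterisations
def tails (c : Int) : List Bool → List Int
  | [] => []
  | b :: r => (c + ib b) :: tails (c + ib b) r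

theorem fold_preStepB (se : List Bool) : ∀ (q : List Int) (c : Int),
    se.foldl preStepB (q ++ [c]) = (q ++ [c]) ++ tails c se := by
  induction se with
  | nil => intro q c; simp [tails]
  | cons b r ih =>
    intro q c
    have h1 : preStepB (q ++ [c]) b = (q ++ [c]) ++ [c + ib b] := by
      simp [preStepB, PySem.List.pyGet?_neg_one_append_singleton, ib]
    rw [List.foldl_cons, h1, ih (q ++ [c]) (c + ib b)]
    simp [tails]

theorem tails_eq (se : List Bool) : ∀ (c : Int),
    c :: tails c se = (List.range (se.length + 1)).map (fun k => c + S se k) := by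
  induction se with
  | nil => intro c; simp [tails, S_zero]
  | cons b r ih =>
    intro c
    have h := ih (c + ib b)
    simp only [tails]
    rw [List.length_cons, List.range_succ_eq_map, List.map_cons, List.map_map]
    have hf : ((fun k => c + S (b :: r) k) ∘ Nat.succ) = fun k => c + ib b + S r k := by
      funext k
      simp [Function.comp, S_cons_succ]
      ring
    rw [hf, ← h]
    simp [S_zero]

theorem pre_eq (se : List Bool) :
    se.foldl preStepB [0] = (List.range (se.length + 1)).map (S se) := by
  have h := fold_preStepB se [] 0
  simp only [List.nil_append, List.cons_append] at h
  have h2 := tails_eq se 0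
  simp only [zero_add] at h2
  rw [h]
  simpa using h2

theorem take_map_range {β : Type} (g : Nat → β) (m n : Nat) :
    List.take m (List.map g (List.range n)) = List.map g (List.range (min m n)) := by
  rw [← List.map_take, List.take_range]

-- per-segment effect of A's outer loop body
theorem stepA_eq (se : List Bool) (s : List Int) (i : Nat) (m : List Int) (h2 : 2 ≤ s.length) :
    stepA se (S se i, m, i) s
      = (S se (i + (s.length - 2)),
         m ++ [S se i] ++ (List.range (s.length - 2)).map (fun j => S se (i + j))
           ++ [S se (i + (s.length - 2))],
         i + (s.length - 2)) := by
  have hr : (PySem.List.pyRange 0 ((s.length : Int) - 2) 1).length = s.length - 2 := by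
    rw [PySem.List.length_pyRange_one]; omega
  have hinner := innerA_eq se (PySem.List.pyRange 0 ((s.length : Int) - 2) 1) i (m ++ [S se i])
  rw [hr] at hinner
  simp only [stepA, hinner]

-- per-segment effect of B's loop body over the prefix table
theorem stepB_eq (se : List Bool) (s : List Int) (i : Nat) (m : List Int)
    (h2 : 2 ≤ s.length) (hle : i + (s.length - 2) ≤ se.length) :
    stepB ((List.range (se.length + 1)).map (S se)) (m, (i : Int)) s
      = (m ++ [S se i] ++ (List.range (s.length - 2 + 1)).map (fun j => S se (i + j)),
         ((i + (s.length - 2) : Nat) : Int)) := by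
  have hget : (PySem.List.pyGet? ((List.range (se.length + 1)).map (S se)) ((i : Int))).getD 0 = S se i := by
    rw [PySem.List.pyGet?_natCast]
    rw [List.getElem?_map, List.getElem?_range (by omega)]
    rfl
  have hcast : (i : Int) + ((s.length : Int) - 2) + 1 = (((i + (s.length - 2) + 1 : Nat)) : Int) := by
    push_cast; omega
  have hsplit : List.range (se.length + 1)
      = List.range i ++ (List.range (se.length + 1 - i)).map (i + ·) := by
    rw [← List.range_add]
    congr 1
    omega
  have hslice : PySem.List.slice ((List.range (se.length + 1)).map (S se)) (some ((i : Int)))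
        (some ((i : Int) + ((s.length : Int) - 2) + 1))
      = (List.range (s.length - 2 + 1)).map (fun j => S se (i + j)) := by
    rw [hcast, PySem.List.slice_natCast]
    rw [hsplit, List.map_append, List.drop_append_of_le_length (by simp)]
    rw [List.drop_eq_nil_of_le (by simp), List.nil_append]
    have hT : i + (s.length - 2) + 1 - i = s.length - 2 + 1 := by omega
    rw [hT, List.map_map, take_map_range]
    have hm : min (s.length - 2 + 1) (se.length + 1 - i) = s.length - 2 + 1 := by omega
    rw [hm]
    rfl
  simp only [stepB, hget, hslice]
  simp
  omega

-- main correspondence between the two outer folds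
theorem main_fold (se : List Bool) : ∀ (segs : List (List Int)) (i : Nat) (m : List Int),
    (∀ s ∈ segs, 2 ≤ s.length) →
    (i : Int) + (segs.map (fun s => (s.length : Int) - 2)).sum = (se.length : Int) →
    (segs.foldl (stepA se) (S se i, m, i)).2.1
      = (segs.foldl (stepB ((List.range (se.length + 1)).map (S se))) (m, (i : Int))).1 := by
  intro segs
  induction segs with
  | nil => intro i m _ _; simp
  | cons s rest ih =>
    intro i m hall hsum
    have h2 : 2 ≤ s.length := hall s (by simp)
    have hrest : ∀ t ∈ rest, 2 ≤ t.length := fun t ht => hall t (by simp [ht])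
    have hnn : 0 ≤ (rest.map (fun s => (s.length : Int) - 2)).sum := by
      apply List.sum_nonneg
      intro x hx
      simp at hx
      obtain ⟨t, ht, rfl⟩ := hx
      have := hrest t ht
      omega
    simp only [List.map_cons, List.sum_cons] at hsum
    have hle : i + (s.length - 2) ≤ se.length := by omega
    have hsum' : (((i + (s.length - 2) : Nat)) : Int)
        + (rest.map (fun s => (s.length : Int) - 2)).sum = (se.length : Int) := by
      push_cast; omega
    rw [List.foldl_cons, List.foldl_cons, stepA_eq se s i m h2, stepB_eq se s i m h2 hle]
    have hchunk : (m ++ [S se i] ++ (List.range (s.length - 2)).map (fun j => S se (i + j))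
          ++ [S se (i + (s.length - 2))])
        = m ++ [S se i] ++ (List.range (s.length - 2 + 1)).map (fun j => S se (i + j)) := by
      rw [List.range_succ]
      simp
    rw [hchunk]
    exact ih (i + (s.length - 2)) _ hrest hsum'

-- ===== VERDICT (by name: the statement is the Claim_ definition above) =====
theorem get_sentence_map_spec : Claim_equal_get_sentence_map := by
  intro segments sentence_end _ hpre
  unfold Spec_get_sentence_map get_sentence_map get_sentence_map_alt
  rw [pre_eq]
  have h := main_fold sentence_end segments 0 [] hpre.1 (by simpa using hpre.2)
  simpa [S_zero] using h
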